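-- pv_equiv track=rewrite | github.com/AlexWUrobot/leetcode_python | Reduce_Gifts.py | reduceGifts
-- ===== SOURCE A (Python) =====
-- def reduceGifts(prices, k, threshold):
--     # If the number of prices is less than k, no removals are needed
--     if len(prices) < k:
--         return 0
--
--     # Sort the prices in ascending order
--     prices.sort()
--
--     # Calculate the sum of the highest k prices
--     current_sum = sum(prices[-k:])
--
--     # If the sum of the highest k prices is within the threshold, no removals are needed
--     if current_sum <= threshold:
--         return 0
--
--     # If the sum of the lowest k prices exceeds the threshold, remove all but one item
--     if sum(prices[:k]) > threshold:
--         return len(prices) - (k - 1)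
--
--     # Initialize a counter for removals
--     removals = 0
--
--     # While the sum of the highest k prices exceeds the threshold and there are more than k prices
--     while current_sum > threshold and len(prices) > k:
--         prices.pop()  # Remove the highest price
--         current_sum = sum(prices[-k:])
--         removals += 1
--
--     return removals
-- ===== SOURCE B (Python) =====
-- def reduceGifts(prices, k, threshold):
--     n = len(prices)
--     if n < k:
--         return 0
--     s = sorted(prices)
--     # prefix[i] = sum of the i smallest prices
--     prefix = [0]
--     for v in s:
--         prefix.append(prefix[-1] + v)
--     if prefix[n] - prefix[n - k] <= threshold:
--         return 0
--     if prefix[k] > threshold: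
--         return n - (k - 1)
--     # after r removals the top-k sum is prefix[n-r] - prefix[n-r-k];
--     # return the least such r (the window at r = n-k is prefix[k] <= threshold)
--     for r in range(1, n - k):
--         if prefix[n - r] - prefix[n - r - k] <= threshold:
--             return r
--     return n - k
-- ===== Notes on version B (the rewrite author's own statement) =====
-- stated objective: faster
-- what changed: B replaces A's destructive pop-loop that re-sums the top k prices after every removal by prefix sums computed once over the sorted list and a single scan over removal counts.
-- outside the precondition, e.g. on reduceGifts([5, 5], 0, 3): A returns 2, B returns 0; on reduceGifts([-5, 1], -1, -1): A raises IndexError, B raises IndexError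
import Mathlib
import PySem

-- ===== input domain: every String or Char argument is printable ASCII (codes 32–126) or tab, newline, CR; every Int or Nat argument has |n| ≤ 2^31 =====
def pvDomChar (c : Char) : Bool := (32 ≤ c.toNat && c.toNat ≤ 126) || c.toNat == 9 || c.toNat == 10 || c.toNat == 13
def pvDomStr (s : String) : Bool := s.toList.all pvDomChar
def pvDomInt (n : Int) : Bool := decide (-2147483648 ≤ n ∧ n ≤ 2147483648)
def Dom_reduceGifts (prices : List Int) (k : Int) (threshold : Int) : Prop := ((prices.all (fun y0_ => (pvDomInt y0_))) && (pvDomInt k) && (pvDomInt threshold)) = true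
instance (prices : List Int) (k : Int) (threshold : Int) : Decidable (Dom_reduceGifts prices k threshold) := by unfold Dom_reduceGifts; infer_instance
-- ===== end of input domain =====

-- B replaces A's pop-and-resum loop by prefix sums over the sorted list scanned once.
-- Note: A sorts and pops `prices` in place; the equivalence proved here is about the RETURN value only (B does not mutate).

-- ===== PORT A =====
-- while current_sum > threshold and len(prices) > k: pop; current_sum = sum(prices[-k:]); removals += 1
-- (fuel = initial length makes the recursion total; within Pre_ it is never exhausted)
def loopA : Nat → List Int → Int → Int → Int → Int → Int
  | 0, _, _, _, _, removals => removals
  | fuel + 1, q, k, threshold, current_sum, removals =>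
    if current_sum > threshold ∧ (q.length : Int) > k then
      let q' := q.dropLast
      loopA fuel q' k threshold (PySem.List.slice q' (some (-k)) none).sum (removals + 1)
    else removals

def reduceGifts (prices : List Int) (k : Int) (threshold : Int) : Int :=
  if (prices.length : Int) < k then 0
  else
    let p := PySem.List.sorted prices (fun x => x) false
    let current_sum := (PySem.List.slice p (some (-k)) none).sum
    if current_sum ≤ threshold then 0
    else if (PySem.List.slice p none (some k)).sum > threshold then (p.length : Int) - (k - 1)
    else loopA p.length p k threshold current_sum 0

-- ===== PORT B =====
-- prefix = [0]; for v in s: prefix.append(prefix[-1] + v)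
def prefixSums : Int → List Int → List Int
  | a, [] => [a]
  | a, v :: t => a :: prefixSums (a + v) t

-- for r in range(1, n - k): if prefix[n-r] - prefix[n-r-k] <= threshold: return r
-- return n - k        (fuel = number of loop iterations, (n-k-1).toNat)
def findR (pf : List Int) (n k threshold r : Int) : Nat → Int
  | 0 => n - k
  | fuel + 1 =>
    if PySem.List.pyGetD pf (n - r) 0 - PySem.List.pyGetD pf (n - r - k) 0 ≤ threshold then r
    else findR pf n k threshold (r + 1) fuel

def reduceGifts_alt (prices : List Int) (k : Int) (threshold : Int) : Int :=
  let n : Int := prices.length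
  if n < k then 0
  else
    let s := PySem.List.sorted prices (fun x => x) false
    let pf := prefixSums 0 s
    if PySem.List.pyGetD pf n 0 - PySem.List.pyGetD pf (n - k) 0 ≤ threshold then 0
    else if PySem.List.pyGetD pf k 0 > threshold then n - (k - 1)
    else findR pf n k threshold 1 (n - k - 1).toNat

-- ===== PRECONDITION & SPEC =====
-- Pre_ restricts to the natural domain k ≥ 1 (k is a count of gifts): for k ≤ 0 A's
-- negative-slice arithmetic yields accidental values (or the pop loop raises IndexError).
def Pre_reduceGifts (prices : List Int) (k : Int) (threshold : Int) : Prop := 1 ≤ k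
instance (prices : List Int) (k : Int) (threshold : Int) : Decidable (Pre_reduceGifts prices k threshold) := by unfold Pre_reduceGifts; infer_instance

def pvWitness_reduceGifts : List Int × Int × Int := ([3, 1, 2], 2, 4)

def Spec_reduceGifts (prices : List Int) (k : Int) (threshold : Int) (out : Int) : Prop := out = reduceGifts_alt prices k threshold
instance (prices : List Int) (k : Int) (threshold : Int) (out : Int) : Decidable (Spec_reduceGifts prices k threshold out) := by unfold Spec_reduceGifts; infer_instance

-- ===== CLAIM (what is proved, stated in full; the proofs are below) =====
def Claim_equal_reduceGifts : Prop := ∀ (prices : List Int) (k : Int) (threshold : Int), Dom_reduceGifts prices k threshold → Pre_reduceGifts prices k threshold → Spec_reduceGifts prices k threshold (reduceGifts prices k threshold)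

-- ===== LEMMAS AND PROOFS =====

-- the top-k sum after the list has been trimmed to its first m elements
def winSum (p : List Int) (kn m : Nat) : Int := ((p.take m).drop (m - kn)).sum

-- number of pops A's while-loop performs from a trimmed list of length m
def countPops (p : List Int) (k threshold : Int) : Nat → Int
  | 0 => 0
  | m + 1 =>
    if winSum p k.toNat (m + 1) ≤ threshold ∨ ((m : Int) + 1 ≤ k) then 0
    else countPops p k threshold m + 1

lemma slice_neg_eq (q : List Int) (k : Int) (hk : 1 ≤ k) :
    PySem.List.slice q (some (-k)) none = q.drop (q.length - k.toNat) := by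
  have h : k = (k.toNat : Int) := by omega
  rw [h, PySem.List.slice_from_neg_natCast q k.toNat (by omega)]
  congr 1

lemma take_sum_split (p : List Int) (kn m : Nat) (hm : kn ≤ m) :
    winSum p kn m = (p.take m).sum - (p.take (m - kn)).sum := by
  have h1 : ((p.take m).take (m - kn)).sum + ((p.take m).drop (m - kn)).sum = (p.take m).sum := by
    rw [← List.sum_append, List.take_append_drop]
  have h2 : (p.take m).take (m - kn) = p.take (m - kn) := by
    rw [List.take_take]
    congr 1
    omega
  rw [h2] at h1
  unfold winSum
  omega

lemma prefix_getD (s : List Int) (a : Int) (i : Nat) (h : i ≤ s.length) :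
    PySem.List.pyGetD (prefixSums a s) (i : Int) 0 = a + (s.take i).sum := by
  induction s generalizing a i with
  | nil =>
    have hi : i = 0 := Nat.le_zero.mp h
    subst hi
    simp [prefixSums, PySem.List.pyGetD]
  | cons v t ih =>
    cases i with
    | zero => simp [prefixSums]
    | succ j =>
      have := ih (a + v) j (by simpa using h)
      push_cast at this ⊢
      rw [show ((j : Int) + 1) = (j : Int) + 1 from rfl]
      simp only [prefixSums]
      rw [show (PySem.List.pyGetD (a :: prefixSums (a + v) t) ((j : Int) + 1) 0)
            = PySem.List.pyGetD (prefixSums (a + v) t) (j : Int) 0 from by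
        simp [PySem.List.pyGetD, PySem.List.pyGet?_cons_succ]]
      rw [this]
      simp [List.take_succ_cons]
      ring

lemma loopA_eq_countPops (p : List Int) (k threshold : Int) (hk : 1 ≤ k) :
    ∀ (m : Nat) (fuel : Nat), m ≤ fuel → m ≤ p.length → ∀ removals,
      loopA fuel (p.take m) k threshold (winSum p k.toNat m) removals
        = removals + countPops p k threshold m := by
  intro m
  induction m with
  | zero =>
    intro fuel _ _ removals
    cases fuel with
    | zero => simp [loopA, countPops]
    | succ f =>
      simp only [loopA, List.take_zero, List.length_nil, countPops]
      rw [if_neg (by push_cast; omega)]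
      simp
  | succ m ih =>
    intro fuel hf hm removals
    cases fuel with
    | zero => omega
    | succ f =>
      have hlen : (p.take (m + 1)).length = m + 1 := by
        simp [List.length_take]; omega
      simp only [loopA, hlen]
      by_cases hc : winSum p k.toNat (m + 1) > threshold ∧ ((m : Nat) + 1 : Int) > k
      · rw [if_pos (by push_cast at hc ⊢; exact hc)]
        have hdl : (p.take (m + 1)).dropLast = p.take m := by
          rw [List.dropLast_eq_take, hlen, List.take_take]
          congr 1
          omega
        have hlen' : (p.take m).length = m := by simp [List.length_take]; omega
        have hcs : (PySem.List.slice (p.take m) (some (-k)) none).sum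
            = winSum p k.toNat m := by
          rw [slice_neg_eq _ _ hk, hlen']
          rfl
        rw [hdl, hcs, ih f (by omega) (by omega) (removals + 1)]
        have : countPops p k threshold (m + 1) = countPops p k threshold m + 1 := by
          simp only [countPops]
          rw [if_neg (by omega)]
        omega
      · rw [if_neg (by push_cast at hc ⊢; omega)]
        have : countPops p k threshold (m + 1) = 0 := by
          simp only [countPops]
          rw [if_pos (by omega)]
        omega

lemma findR_eq_countPops (p : List Int) (k threshold : Int) (hk : 1 ≤ k)
    (n : Nat) (hn : n = p.length) (hkn : k.toNat < n) :
    ∀ (fuel : Nat) (rn : Nat), 1 ≤ rn → rn + fuel = n - k.toNat →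
      findR (prefixSums 0 p) (n : Int) k threshold (rn : Int) fuel
        = (rn : Int) + countPops p k threshold (n - rn) := by
  intro fuel
  induction fuel with
  | zero =>
    intro rn h1 h2
    have hr : rn = n - k.toNat := by omega
    have : n - rn = k.toNat := by omega
    rw [this]
    have hc : countPops p k threshold k.toNat = 0 := by
      cases h : k.toNat with
      | zero => simp [countPops]
      | succ j =>
        simp only [countPops]
        rw [if_pos (by right; omega)]
    rw [hc]
    simp only [findR]
    omega
  | succ fuel ih =>
    intro rn h1 h2
    have hmr : k.toNat < n - rn := by omega
    have e1 : (n : Int) - rn = ((n - rn : Nat) : Int) := by omega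
    have e2 : ((n - rn : Nat) : Int) - k = ((n - rn - k.toNat : Nat) : Int) := by omega
    simp only [findR]
    rw [e1, e2, prefix_getD p 0 (n - rn) (by omega), prefix_getD p 0 (n - rn - k.toNat) (by omega)]
    have hw : (0 + (p.take (n - rn)).sum) - (0 + (p.take (n - rn - k.toNat)).sum)
        = winSum p k.toNat (n - rn) := by
      rw [take_sum_split p k.toNat (n - rn) (by omega)]
      ring
    rw [hw]
    by_cases hle : winSum p k.toNat (n - rn) ≤ threshold
    · rw [if_pos hle]
      have : countPops p k threshold (n - rn) = 0 := by
        cases h : n - rn with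
        | zero => simp [countPops]
        | succ j =>
          rw [h] at hle
          simp only [countPops]
          rw [if_pos (Or.inl hle)]
      rw [this]; ring
    · rw [if_neg hle]
      have e3 : (rn : Int) + 1 = ((rn + 1 : Nat) : Int) := by push_cast; ring
      rw [e3, ih (rn + 1) (by omega) (by omega)]
      have hstep : countPops p k threshold (n - rn) = countPops p k threshold (n - rn - 1) + 1 := by
        cases h : n - rn with
        | zero => omega
        | succ j =>
          rw [h] at hle
          simp only [countPops]
          rw [if_neg (by omega)]
          have hj : j = n - rn - 1 := by omega
          rw [hj]
          simp only [Nat.add_sub_cancel]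
      rw [hstep]
      have : n - (rn + 1) = n - rn - 1 := by omega
      rw [this]
      omega

-- ===== VERDICT (by name: the statement is the Claim_ definition above) =====
theorem reduceGifts_spec : Claim_equal_reduceGifts := by
  intro prices k threshold _ hk
  replace hk : 1 ≤ k := hk
  unfold Spec_reduceGifts reduceGifts reduceGifts_alt
  set p := PySem.List.sorted prices (fun x => x) false with hp
  have hlen : p.length = prices.length := PySem.List.length_sorted prices (fun x => x) false
  by_cases h1 : (prices.length : Int) < k
  · rw [if_pos h1, if_pos h1]
  · rw [if_neg h1, if_neg h1]
    dsimp only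
    have hkn : k.toNat ≤ p.length := by omega
    have hkk : (k.toNat : Int) = k := by omega
    -- the two reads of the top-k sum are the same window sum
    have etop : (PySem.List.slice p (some (-k)) none).sum = winSum p k.toNat p.length := by
      rw [slice_neg_eq p k hk]
      unfold winSum
      rw [List.take_length]
    have etopB : PySem.List.pyGetD (prefixSums 0 p) (prices.length : Int) 0
        - PySem.List.pyGetD (prefixSums 0 p) ((prices.length : Int) - k) 0
        = winSum p k.toNat p.length := by
      have e2 : (prices.length : Int) - k = ((p.length - k.toNat : Nat) : Int) := by omega
      have e1 : (prices.length : Int) = ((p.length : Nat) : Int) := by rw [hlen]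
      rw [e2, e1, prefix_getD p 0 p.length (le_refl _),
          prefix_getD p 0 (p.length - k.toNat) (by omega),
          take_sum_split p k.toNat p.length hkn, List.take_length]
      ring
    -- the two reads of the bottom-k sum are the same prefix sum
    have elow : (PySem.List.slice p none (some k)).sum = (p.take k.toNat).sum := by
      rw [PySem.List.slice_to p (by omega)]
    have elowB : PySem.List.pyGetD (prefixSums 0 p) k 0 = (p.take k.toNat).sum := by
      have := prefix_getD p 0 k.toNat hkn
      rw [hkk] at this
      rw [this]
      ring
    rw [etop, etopB, elow, elowB]
    split_ifs with h2 h3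
    · rfl
    · rw [hlen]
    · -- the loop cases: k.toNat < p.length, else branches 2 and 3 contradict
      have hlt : k.toNat < p.length := by
        rcases Nat.lt_or_ge k.toNat p.length with h | h
        · exact h
        · exfalso
          have he : k.toNat = p.length := by omega
          rw [take_sum_split p k.toNat p.length hkn, he, List.take_length] at h2
          simp only [Nat.sub_self, List.take_zero, List.sum_nil] at h2
          apply h3
          rw [he, List.take_length]
          omega
      have eA := loopA_eq_countPops p k threshold hk p.length p.length (le_refl _) (le_refl _) 0
      rw [List.take_length] at eA
      have eB : findR (prefixSums 0 p) (prices.length : Int) k threshold 1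
            ((prices.length : Int) - k - 1).toNat
          = 1 + countPops p k threshold (p.length - 1) := by
        have efuel : ((prices.length : Int) - k - 1).toNat = p.length - k.toNat - 1 := by omega
        have e1 : ((prices.length : Nat) : Int) = ((p.length : Nat) : Int) := by rw [hlen]
        have e3 : (1 : Int) = ((1 : Nat) : Int) := by norm_num
        rw [efuel, e1, e3,
          findR_eq_countPops p k threshold hk p.length rfl (by omega) (p.length - k.toNat - 1) 1
            (le_refl _) (by omega)]
      rw [eA, eB]
      -- one more pop is forced at the full length, so countPops n = 1 + countPops (n-1)
      cases hnn : p.length with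
      | zero => omega
      | succ m =>
        rw [hnn] at h2 hlt
        simp only [Nat.add_sub_cancel]
        simp only [countPops]
        rw [if_neg (by omega)]
        omega
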